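-- pv_equiv track=rewrite | github.com/pypi-data/pypi-mirror-398 | packages/pybitfsm/pybitfsm-0.0.1-py3-none-manylinux_2_17_x86_64.manylinux2014_x86_64.manylinux_2_28_x86_64.whl/pybitfsm/bits.py | parse
-- ===== SOURCE A (Python) =====
-- def parse(s: str, digits='01') -> int:
--     """Converts a string representing a bit sequence to an integer.
--
--     The optional parameter `digits` specifies which characters represent
--     zero and one bits.
--
--     >>> parse('0 1 0 1')
--     10
--     >>> parse('1 0 0 1 1 0')
--     25
--     >>> parse('1 _ _ 1 1 _', digits='_1')
--     25
--     >>> parse('0', digits='')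
--     Traceback (most recent call last):
--         ...
--     ValueError: digits must contain exactly two characters
--     >>> parse('1 _')
--     Traceback (most recent call last):
--         ...
--     ValueError: Unrecognized binary digit: "_"
--
--     """
--     if len(digits) != 2:
--         raise ValueError(f'digits must contain exactly two characters')
--     s = s.replace(' ', '')
--     result = 0
--     for index, ch in enumerate(s):
--         try:
--             result |= digits.index(ch) << index
--         except ValueError:
--             raise ValueError(f'Unrecognized binary digit: "{ch}"') from None
--     return result
-- ===== SOURCE B (Python) =====
-- def parse(s: str, digits='01') -> int:
--     """Converts a string representing a bit sequence to an integer."""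
--     if len(digits) != 2:
--         raise ValueError(f'digits must contain exactly two characters')
--     d0, d1 = digits
--     bits = []
--     for ch in s.replace(' ', ''):
--         if ch == d0:
--             bits.append(0)
--         elif ch == d1:
--             bits.append(1)
--         else:
--             raise ValueError(f'Unrecognized binary digit: "{ch}"') from None
--     result = 0
--     for b in reversed(bits):
--         result = 2 * result + b
--     return result
-- ===== Notes on version B (the rewrite author's own statement) =====
-- stated objective: alternative
-- what changed: A accumulates the result in one pass with result |= digits.index(ch) << index; B first normalizes the characters to an explicit 0/1 bit list (unpacking digits once into d0, d1 instead of calling .index per character) and then computes the value by a separate MSB-first Horner pass over the reversed list.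
import Mathlib
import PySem

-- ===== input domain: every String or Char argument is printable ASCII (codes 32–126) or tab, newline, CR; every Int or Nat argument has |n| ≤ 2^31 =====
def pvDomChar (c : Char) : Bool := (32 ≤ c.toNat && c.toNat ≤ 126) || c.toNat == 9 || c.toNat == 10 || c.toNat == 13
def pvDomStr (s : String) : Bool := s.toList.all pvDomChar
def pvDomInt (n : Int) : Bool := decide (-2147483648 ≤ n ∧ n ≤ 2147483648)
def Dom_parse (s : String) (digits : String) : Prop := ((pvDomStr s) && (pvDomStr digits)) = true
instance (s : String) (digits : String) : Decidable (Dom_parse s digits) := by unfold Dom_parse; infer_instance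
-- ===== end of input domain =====

-- B replaces A's enumerate + |=/<< bit accumulation by a two-phase decomposition:
-- normalize the characters to a bit list, then one MSB-first Horner pass over its
-- reverse (objective: alternative decomposition, same cost).

-- ===== PORT A =====
-- A's loop body: result |= digits.index(ch) << index
def parseStep (digits : List Char) (result : Int) (p : Int × Char) : Int :=
  match PySem.List.index? digits p.2 with
  | some i => PySem.Int.bor result ((i : Int) <<< p.1.toNat)
  | none => result   -- Python: raise ValueError — excluded by Pre_parse

def parse (s : String) (digits : String) : Int :=
  if PySem.Str.len digits ≠ 2 then 0   -- Python: raise ValueError — excluded by Pre_parse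
  else
    (PySem.List.enumerate (PySem.Str.replace s " " "").toList 0).foldl
      (parseStep digits.toList) 0

-- ===== PORT B =====
def parse_alt (s : String) (digits : String) : Int :=
  match digits.toList with
  | [d0, d1] =>
    let bits : List Int := (PySem.Str.replace s " " "").toList.foldl
      (fun acc ch =>
        if ch = d0 then acc ++ [0]
        else if ch = d1 then acc ++ [1]
        else acc)   -- Python: raise ValueError — excluded by Pre_parse
      []
    bits.reverse.foldl (fun result b => 2 * result + b) 0
  | _ => 0   -- Python: raise ValueError — excluded by Pre_parse

-- ===== PRECONDITION & SPEC =====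
-- Pre_parse = exactly the inputs where A returns: digits has two characters and
-- every non-space character of s occurs in digits (otherwise A raises ValueError).
def Pre_parse (s : String) (digits : String) : Prop :=
  digits.toList.length = 2 ∧
    (PySem.Str.replace s " " "").toList.all (fun c => c ∈ digits.toList) = true
instance (s : String) (digits : String) : Decidable (Pre_parse s digits) := by
  unfold Pre_parse; infer_instance
def pvWitness_parse : String × String := ("0 1", "01")

def Spec_parse (s : String) (digits : String) (out : Int) : Prop := out = parse_alt s digits
instance (s : String) (digits : String) (out : Int) : Decidable (Spec_parse s digits out) := by unfold Spec_parse; infer_instance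

-- ===== CLAIM (what is proved, stated in full; the proofs are below) =====
def Claim_equal_parse : Prop := ∀ (s : String) (digits : String), Dom_parse s digits → Pre_parse s digits → Spec_parse s digits (parse s digits)

-- ===== LEMMAS AND PROOFS =====

-- r ||| 2^k adds a fresh high bit when r < 2^k
theorem pv_lor_two_pow (r k : Nat) (h : r < 2^k) : r ||| 2^k = r + 2^k := by
  apply Nat.eq_of_testBit_eq
  intro j
  rw [Nat.testBit_or, Nat.add_comm]
  rcases lt_trichotomy j k with hj | rfl | hj
  · rw [Nat.testBit_two_pow_add_gt hj, Nat.testBit_two_pow_of_ne (by omega)]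
    simp
  · rw [Nat.testBit_two_pow_add_eq, Nat.testBit_two_pow_self,
      Nat.testBit_lt_two_pow h]
    simp
  · have hle : 2^(k+1) ≤ 2^j := Nat.pow_le_pow_right (by omega) (by omega)
    have hp : 2^(k+1) = 2^k*2 := Nat.pow_succ 2 k
    rw [Nat.testBit_lt_two_pow (by omega), Nat.testBit_lt_two_pow (by omega),
      Nat.testBit_lt_two_pow (show 2^k+r < 2^j by omega)]
    simp

-- the LSB-first value of a character list over digit pair (d0, d1)
def pvVal (d0 d1 : Char) : List Char → Nat
  | [] => 0
  | c :: t => (if c = d0 then 0 else 1) + 2 * pvVal d0 d1 t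

-- A's loop over enumerate computes pvVal, shifted by the start index
theorem pv_loopA (d0 d1 : Char) (t : List Char) (k r : Nat)
    (hm : ∀ c ∈ t, c ∈ [d0, d1]) (hr : r < 2^k) :
    (PySem.List.enumerate t (k : Int)).foldl (parseStep [d0, d1]) (r : Int)
      = ((r + 2^k * pvVal d0 d1 t : Nat) : Int) := by
  induction t generalizing k r with
  | nil => simp [PySem.List.enumerate_nil, pvVal]
  | cons c t ih =>
    have hc : c ∈ [d0, d1] := hm c (by simp)
    have hstep : ∀ b : Nat, b = (if c = d0 then 0 else 1) →
        PySem.List.index? [d0, d1] c = some b →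
        (PySem.List.enumerate (c :: t) (k : Int)).foldl (parseStep [d0, d1]) (r : Int)
        = ((r + 2^k * pvVal d0 d1 (c :: t) : Nat) : Int) := by
      intro b hb hidx
      rw [PySem.List.enumerate_cons]
      have hcast : ((k : Int) + 1) = ((k + 1 : Nat) : Int) := by push_cast; ring
      have hshift : ((b : Int) <<< ((k : Int)).toNat) = ((b <<< k : Nat) : Int) := by
        simp [Int.shiftLeft_eq, Nat.shiftLeft_eq]
      have hbor : PySem.Int.bor (r : Int) ((b : Int) <<< ((k : Int)).toNat)
          = ((r + b * 2^k : Nat) : Int) := by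
        rw [hshift, PySem.Int.bor_natCast]
        congr 1
        rw [Nat.shiftLeft_eq]
        have hb01 : b = 0 ∨ b = 1 := by rw [hb]; split <;> simp
        rcases hb01 with h0 | h1
        · subst h0; simp
        · subst h1
          rw [one_mul, pv_lor_two_pow r k hr]
      simp only [List.foldl_cons, parseStep, hidx, hbor, hcast]
      rw [ih (fun x hx => hm x (by simp [hx])) (k := k + 1)
        (r := r + b * 2^k) (by
          have hb1 : b ≤ 1 := by rw [hb]; split <;> simp
          have : 2^(k+1) = 2^k*2 := Nat.pow_succ 2 k
          nlinarith)]
      rw [show pvVal d0 d1 (c :: t) = (if c = d0 then 0 else 1) + 2 * pvVal d0 d1 t from rfl,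
        ← hb]
      congr 1
      rw [Nat.pow_succ]
      ring
    by_cases h0 : c = d0
    · exact hstep 0 (by simp [h0]) (by subst h0; exact PySem.List.index?_cons_self c [d1])
    · have h1 : c = d1 := by rcases hc with h | h | h <;> simp_all
      refine hstep 1 (by simp [h0]) ?_
      have hne : d0 ≠ c := fun h => h0 h.symm
      rw [PySem.List.index?_cons_of_ne [d1] hne]
      subst h1
      rw [PySem.List.index?_cons_self c []]
      rfl

-- B's Horner pass over the reversed bit list computes pvVal
theorem pv_loopB (d0 d1 : Char) (t : List Char) :
    ((t.map (fun c => if c = d0 then (0 : Int) else 1)).reverse.foldl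
      (fun result b => 2 * result + b) 0) = ((pvVal d0 d1 t : Nat) : Int) := by
  induction t with
  | nil => simp [pvVal]
  | cons c t ih =>
    simp only [List.map_cons, List.reverse_cons, List.foldl_append, List.foldl_cons,
      List.foldl_nil, ih]
    rw [show pvVal d0 d1 (c :: t) = (if c = d0 then 0 else 1) + 2 * pvVal d0 d1 t from rfl]
    by_cases hc : c = d0
    · simp [hc]
    · simp [hc]
      ring

-- ===== VERDICT (by name: the statement is the Claim_ definition above) =====
theorem parse_spec : Claim_equal_parse := by
  intro s digits _ hpre
  obtain ⟨hlen, hmemb⟩ := hpre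
  have hmem : ∀ c ∈ (PySem.Str.replace s " " "").toList, c ∈ digits.toList := by
    simpa [List.all_eq_true] using hmemb
  unfold Spec_parse parse parse_alt
  obtain ⟨d0, d1, hd⟩ : ∃ d0 d1, digits.toList = [d0, d1] := by
    match hdt : digits.toList with
    | [d0, d1] => exact ⟨d0, d1, rfl⟩
    | [] | [_] | _ :: _ :: _ :: _ => simp [hdt] at hlen
  have hlen2 : PySem.Str.len digits = 2 := by
    simp [PySem.Str.len_eq, hd]
  rw [hlen2, hd]
  simp only [if_neg (by omega : ¬ (2 : Int) ≠ 2)]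
  set t := (PySem.Str.replace s " " "").toList with ht
  have hmem' : ∀ c ∈ t, c ∈ [d0, d1] := by
    intro c hc; have := hmem c hc; rwa [hd] at this
  -- A's side
  have hA := pv_loopA d0 d1 t 0 0 hmem' (by norm_num)
  push_cast at hA
  rw [hA]
  -- B's side
  have hB : t.foldl
      (fun acc ch => if ch = d0 then acc ++ [(0 : Int)]
        else if ch = d1 then acc ++ [1] else acc) []
      = t.foldl (fun acc ch => acc ++ [if ch = d0 then (0 : Int) else 1]) [] := by
    apply PySem.List.foldl_congr_mem
    intro acc x hx
    have h := hmem' x hx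
    simp only [List.mem_cons, List.not_mem_nil, or_false] at h
    rcases h with h | h
    · simp [h]
    · by_cases h1 : d1 = d0
      · simp [h, h1]
      · simp [h, h1]
  rw [hB, PySem.List.foldl_append_singleton_eq_map, List.nil_append, pv_loopB d0 d1 t]
  simp
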